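-- pv_equiv track=rewrite | github.com/spahnrl/prj_BookieX | tools/migration/fetch_missing_raw.py | _audit_ncaam
-- ===== SOURCE A (Python) =====
-- def _audit_ncaam(ncaam_games: list, all_ids: set, non_empty_ids: set) -> tuple[set[str], set[str]]:
--     """Returns (missing_event_ids, empty_event_ids) that need fetch. Uses game_id from universe = ESPN id."""
--     missing = set()
--     empty = set()
--     for g in ncaam_games:
--         gid = (g.get("game_id") or "").strip()
--         if not gid:
--             continue
--         if gid not in all_ids:
--             missing.add(gid)
--         elif gid not in non_empty_ids:
--             empty.add(gid)
--     return missing, empty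
-- ===== SOURCE B (Python) =====
-- def _audit_ncaam(ncaam_games: list, all_ids: set, non_empty_ids: set) -> tuple[set[str], set[str]]:
--     """Returns (missing_event_ids, empty_event_ids) that need fetch. Uses game_id from universe = ESPN id."""
--     # Stage 1: build a status index over the known ids once:
--     #   absent -> 0 (missing), present but empty -> 1, present and non-empty -> 2.
--     status = dict.fromkeys(all_ids, 1)
--     for i in non_empty_ids:
--         if i in status:
--             status[i] = 2
--     # Stage 2: tag each distinct valid game id with its status (first occurrence wins).
--     cat = {}
--     for g in ncaam_games:
--         gid = (g.get("game_id") or "").strip()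
--         if gid and gid not in cat:
--             cat[gid] = status.get(gid, 0)
--     # Stage 3: partition the tag map.
--     missing = {gid for gid, c in cat.items() if c == 0}
--     empty = {gid for gid, c in cat.items() if c == 1}
--     return missing, empty
-- ===== Notes on version B (the rewrite author's own statement) =====
-- stated objective: alternative
-- what changed: Replaces A's single if/elif pass with two accumulator sets by a three-stage table approach: first build a status index over the known ids (absent=0 / empty=1 / non-empty=2), then tag each distinct valid game id with one table lookup into an ordered tag map, then partition the tag map into the missing and empty sets.
import Mathlib
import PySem

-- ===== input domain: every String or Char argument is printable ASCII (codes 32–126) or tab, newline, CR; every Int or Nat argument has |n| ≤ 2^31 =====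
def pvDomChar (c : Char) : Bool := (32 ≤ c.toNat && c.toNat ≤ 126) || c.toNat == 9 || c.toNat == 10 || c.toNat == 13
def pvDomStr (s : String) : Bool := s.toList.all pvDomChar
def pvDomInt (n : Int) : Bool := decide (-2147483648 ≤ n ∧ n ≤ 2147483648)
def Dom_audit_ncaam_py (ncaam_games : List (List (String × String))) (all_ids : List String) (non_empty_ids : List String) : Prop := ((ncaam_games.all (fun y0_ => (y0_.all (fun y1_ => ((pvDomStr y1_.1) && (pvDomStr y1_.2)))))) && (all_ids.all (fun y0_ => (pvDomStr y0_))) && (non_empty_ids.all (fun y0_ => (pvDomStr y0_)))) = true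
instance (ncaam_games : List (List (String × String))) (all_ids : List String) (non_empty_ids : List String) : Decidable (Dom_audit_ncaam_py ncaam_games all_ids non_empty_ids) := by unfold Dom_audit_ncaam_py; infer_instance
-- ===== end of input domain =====

-- B builds a status index over the known ids, tags each distinct valid game id once in an
-- ordered tag map, and partitions the tags; A classifies per element with if/elif into two
-- accumulator sets (objective: alternative; same asymptotic cost).

-- shared by both Pythons: (g.get("game_id") or "").strip(); 'x or ""' with a string x is getD "",
-- since the only falsy string is "" and 'None or ""' is "".
def pvGid (g : List (String × String)) : String :=
  PySem.Str.strip (((PySem.Dict.mk g).get? "game_id").getD "")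

-- ===== PORT A =====
def audit_ncaam_py (ncaam_games : List (List (String × String))) (all_ids : List String) (non_empty_ids : List String) : List String × List String :=
  ncaam_games.foldl
    (fun (st : PySem.Set String × PySem.Set String) g =>
      let gid := pvGid g
      if gid == "" then st
      else if !(PySem.Set.contains all_ids gid) then (PySem.Set.add st.1 gid, st.2)
      else if !(PySem.Set.contains non_empty_ids gid) then (st.1, PySem.Set.add st.2 gid)
      else st)
    (PySem.Set.empty, PySem.Set.empty)

-- ===== PORT B =====
def audit_ncaam_py_alt (ncaam_games : List (List (String × String))) (all_ids : List String) (non_empty_ids : List String) : List String × List String :=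
  -- stage 1: status = dict.fromkeys(all_ids, 1); then upgrade present non-empty ids to 2
  let status : PySem.Dict String Int :=
    non_empty_ids.foldl
      (fun d i => if d.contains i then d.insert i 2 else d)
      (all_ids.foldl (fun d i => d.insert i 1) PySem.Dict.empty)
  -- stage 2: tag each distinct valid gid with status.get(gid, 0), first occurrence wins
  let cat : PySem.Dict String Int :=
    ncaam_games.foldl
      (fun c g =>
        let gid := pvGid g
        if gid == "" then c
        else if c.contains gid then c
        else c.insert gid (status.getD gid 0))
      PySem.Dict.empty
  -- stage 3: partition the tag map
  ((cat.items.filter (fun p => p.2 == (0 : Int))).map (fun p => p.1),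
   (cat.items.filter (fun p => p.2 == (1 : Int))).map (fun p => p.1))

-- ===== PRECONDITION & SPEC =====
def Spec_audit_ncaam_py (ncaam_games : List (List (String × String))) (all_ids : List String) (non_empty_ids : List String) (out : List String × List String) : Prop := out = audit_ncaam_py_alt ncaam_games all_ids non_empty_ids
instance (ncaam_games : List (List (String × String))) (all_ids : List String) (non_empty_ids : List String) (out : List String × List String) : Decidable (Spec_audit_ncaam_py ncaam_games all_ids non_empty_ids out) := by unfold Spec_audit_ncaam_py; infer_instance

-- ===== CLAIM (what is proved, stated in full; the proofs are below) =====
def Claim_equal_audit_ncaam_py : Prop := ∀ (ncaam_games : List (List (String × String))) (all_ids : List String) (non_empty_ids : List String), Dom_audit_ncaam_py ncaam_games all_ids non_empty_ids → Spec_audit_ncaam_py ncaam_games all_ids non_empty_ids (audit_ncaam_py ncaam_games all_ids non_empty_ids)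

-- ===== LEMMAS AND PROOFS =====

-- the fixed classification of a gid, as A computes it per element
def pvClassify (all_ids non_empty_ids : List String) (gid : String) : Int :=
  if PySem.Set.contains all_ids gid then
    (if PySem.Set.contains non_empty_ids gid then 2 else 1)
  else 0

-- the two extraction maps of stage 3
def pvEx0 (c : PySem.Dict String Int) : List String :=
  (c.items.filter (fun p => p.2 == (0 : Int))).map (fun p => p.1)
def pvEx1 (c : PySem.Dict String Int) : List String :=
  (c.items.filter (fun p => p.2 == (1 : Int))).map (fun p => p.1)

lemma pv_get?_fromkeys (a : List String) (gid : String) :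
    ∀ d : PySem.Dict String Int,
      (a.foldl (fun d i => d.insert i 1) d).get? gid
        = if gid ∈ a then some 1 else d.get? gid := by
  induction a with
  | nil => intro d; simp
  | cons i rest ih =>
    intro d
    simp only [List.foldl_cons, ih (d.insert i 1), PySem.Dict.get?_insert]
    by_cases h1 : gid ∈ rest <;> by_cases h2 : gid = i <;>
      simp [h1, h2]

lemma pv_contains_step2 (d : PySem.Dict String Int) (i gid : String) :
    ((if d.contains i then d.insert i 2 else d).contains gid) = d.contains gid := by
  by_cases h : d.contains i = true
  · rw [if_pos h, PySem.Dict.contains_insert]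
    by_cases h2 : gid = i <;> simp [h2, h]
  · rw [if_neg h]

lemma pv_get?_upgrade (n : List String) (gid : String) :
    ∀ d : PySem.Dict String Int,
      (n.foldl (fun d i => if d.contains i then d.insert i 2 else d) d).get? gid
        = if gid ∈ n ∧ d.contains gid then some 2 else d.get? gid := by
  induction n with
  | nil => intro d; simp
  | cons i rest ih =>
    intro d
    simp only [List.foldl_cons, ih, pv_contains_step2]
    by_cases hdi : d.contains i = true <;> by_cases h2 : gid = i <;>
      by_cases h1 : gid ∈ rest <;>
        simp_all [PySem.Dict.get?_insert]

-- status.get(gid, 0) computes exactly A's per-element classification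
lemma pv_status_getD (a n : List String) (gid : String) :
    (n.foldl (fun d i => if d.contains i then d.insert i 2 else d)
        (a.foldl (fun d i => d.insert i 1) PySem.Dict.empty)).getD gid 0
      = pvClassify a n gid := by
  rw [PySem.Dict.getD_eq_get?_getD, pv_get?_upgrade,
      PySem.Dict.contains_eq_isSome_get?, pv_get?_fromkeys]
  unfold pvClassify
  by_cases h1 : gid ∈ a <;> by_cases h2 : gid ∈ n <;>
    simp [h1, h2, PySem.Set.contains, PySem.Dict.get?_empty]

lemma pv_mem_ex0 (c : PySem.Dict String Int) (gid : String) :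
    gid ∈ pvEx0 c ↔ ∃ v, (gid, v) ∈ c.items ∧ v = 0 := by
  simp [pvEx0, List.mem_map, List.mem_filter]

lemma pv_mem_ex1 (c : PySem.Dict String Int) (gid : String) :
    gid ∈ pvEx1 c ↔ ∃ v, (gid, v) ∈ c.items ∧ v = 1 := by
  simp [pvEx1, List.mem_map, List.mem_filter]

lemma pv_not_mem_ex0 (c : PySem.Dict String Int) (gid : String)
    (h : c.contains gid = false) : gid ∉ pvEx0 c := by
  rw [pv_mem_ex0]
  rintro ⟨v, hm, -⟩
  have hk : gid ∈ c.keys := by simpa using PySem.Dict.mem_keys_of_mem_items c hm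
  have := (PySem.Dict.contains_iff_mem_keys c gid).mpr hk
  simp [h] at this

lemma pv_not_mem_ex1 (c : PySem.Dict String Int) (gid : String)
    (h : c.contains gid = false) : gid ∉ pvEx1 c := by
  rw [pv_mem_ex1]
  rintro ⟨v, hm, -⟩
  have hk : gid ∈ c.keys := by simpa using PySem.Dict.mem_keys_of_mem_items c hm
  have := (PySem.Dict.contains_iff_mem_keys c gid).mpr hk
  simp [h] at this

lemma pv_mem_ex_of_contains (c : PySem.Dict String Int) (gid : String)
    (a n : List String)
    (hinv : ∀ p ∈ c.items, p.2 = pvClassify a n p.1)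
    (hc : c.contains gid = true) :
    (gid, pvClassify a n gid) ∈ c.items := by
  have hk : gid ∈ c.keys := (PySem.Dict.contains_iff_mem_keys c gid).mp hc
  simp only [PySem.Dict.keys, List.mem_map] at hk
  obtain ⟨⟨k, v⟩, hm, hk1⟩ := hk
  have hv := hinv (k, v) hm
  simp only at hk1
  subst hk1
  rw [← hv]
  exact hm

lemma pv_ex0_insert_fresh (c : PySem.Dict String Int) (gid : String) (v : Int)
    (h : c.contains gid = false) :
    pvEx0 (c.insert gid v) = pvEx0 c ++ (if v == 0 then [gid] else []) := by
  unfold pvEx0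
  rw [PySem.Dict.items_insert, if_neg (by simp [h])]
  by_cases hv : v = 0 <;> simp [List.filter_append, hv]

lemma pv_ex1_insert_fresh (c : PySem.Dict String Int) (gid : String) (v : Int)
    (h : c.contains gid = false) :
    pvEx1 (c.insert gid v) = pvEx1 c ++ (if v == 1 then [gid] else []) := by
  unfold pvEx1
  rw [PySem.Dict.items_insert, if_neg (by simp [h])]
  by_cases hv : v = 1 <;> simp [List.filter_append, hv]

-- Set.add is a no-op on an element already present, an append otherwise
lemma pv_set_add_of_mem (s : PySem.Set String) (x : String) (h : x ∈ s) :
    PySem.Set.add s x = s := by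
  simp [PySem.Set.add, PySem.Set.contains, h]

lemma pv_set_add_of_not_mem (s : PySem.Set String) (x : String) (h : x ∉ s) :
    PySem.Set.add s x = s ++ [x] := by
  simp [PySem.Set.add, PySem.Set.contains, h]

-- the loop invariant: with every recorded tag equal to the classification of its key,
-- A's remaining pass equals the extractions of B's remaining tagging pass
lemma pv_loop (a n : List String) :
    ∀ (games : List (List (String × String))) (c : PySem.Dict String Int),
      (∀ p ∈ c.items, p.2 = pvClassify a n p.1) →
      games.foldl
        (fun (st : PySem.Set String × PySem.Set String) g =>
          let gid := pvGid g
          if gid == "" then st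
          else if !(PySem.Set.contains a gid) then (PySem.Set.add st.1 gid, st.2)
          else if !(PySem.Set.contains n gid) then (st.1, PySem.Set.add st.2 gid)
          else st)
        (pvEx0 c, pvEx1 c)
      = (pvEx0 (games.foldl
            (fun c g =>
              let gid := pvGid g
              if gid == "" then c
              else if c.contains gid then c
              else c.insert gid (pvClassify a n gid)) c),
         pvEx1 (games.foldl
            (fun c g =>
              let gid := pvGid g
              if gid == "" then c
              else if c.contains gid then c
              else c.insert gid (pvClassify a n gid)) c))
  | [], c, _ => by simp
  | g :: gs, c, hinv => by
    simp only [List.foldl_cons]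
    by_cases h0 : (pvGid g == "") = true
    · rw [if_pos h0, if_pos h0]
      exact pv_loop a n gs c hinv
    · rw [if_neg h0, if_neg h0]
      set gid := pvGid g with hg
      have hinv' : ∀ hc : c.contains gid = false,
          ∀ p ∈ (c.insert gid (pvClassify a n gid)).items, p.2 = pvClassify a n p.1 := by
        intro _ p hp
        rcases (PySem.Dict.mem_items_insert c gid (pvClassify a n gid) p).mp hp with h | ⟨h, -⟩
        · subst h; rfl
        · exact hinv p h
      by_cases ha : PySem.Set.contains a gid = true
      · rw [if_neg (by rw [ha]; decide)]
        by_cases hn : PySem.Set.contains n gid = true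
        · -- classification 2: A does nothing, B records tag 2
          have hcl : pvClassify a n gid = 2 := by
            unfold pvClassify; rw [if_pos ha, if_pos hn]
          rw [if_neg (by rw [hn]; decide)]
          by_cases hc : c.contains gid = true
          · rw [if_pos hc]
            exact pv_loop a n gs c hinv
          · have hc' : c.contains gid = false := by simpa using hc
            rw [if_neg hc]
            have hrec := pv_loop a n gs (c.insert gid (pvClassify a n gid)) (hinv' hc')
            have e0 : pvEx0 (c.insert gid (pvClassify a n gid)) = pvEx0 c := by
              rw [pv_ex0_insert_fresh c gid _ hc', hcl]; simp
            have e1 : pvEx1 (c.insert gid (pvClassify a n gid)) = pvEx1 c := by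
              rw [pv_ex1_insert_fresh c gid _ hc', hcl]; simp
            rw [e0, e1] at hrec
            exact hrec
        · -- classification 1: A adds to empty, B records tag 1
          have hcl : pvClassify a n gid = 1 := by
            unfold pvClassify; rw [if_pos ha, if_neg hn]
          have hnf : PySem.Set.contains n gid = false := by simpa using hn
          rw [if_pos (by rw [hnf]; decide)]
          by_cases hc : c.contains gid = true
          · rw [if_pos hc]
            have hmem : gid ∈ pvEx1 c :=
              (pv_mem_ex1 c gid).mpr ⟨pvClassify a n gid,
                pv_mem_ex_of_contains c gid a n hinv hc, hcl⟩
            rw [pv_set_add_of_mem _ _ hmem]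
            exact pv_loop a n gs c hinv
          · have hc' : c.contains gid = false := by simpa using hc
            rw [if_neg hc]
            rw [pv_set_add_of_not_mem _ _ (pv_not_mem_ex1 c gid hc')]
            have hrec := pv_loop a n gs (c.insert gid (pvClassify a n gid)) (hinv' hc')
            have e0 : pvEx0 (c.insert gid (pvClassify a n gid)) = pvEx0 c := by
              rw [pv_ex0_insert_fresh c gid _ hc', hcl]; simp
            have e1 : pvEx1 (c.insert gid (pvClassify a n gid)) = pvEx1 c ++ [gid] := by
              rw [pv_ex1_insert_fresh c gid _ hc', hcl]; simp
            rw [e0, e1] at hrec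
            exact hrec
      · -- classification 0: A adds to missing, B records tag 0
        have hcl : pvClassify a n gid = 0 := by
          unfold pvClassify; rw [if_neg ha]
        have haf : PySem.Set.contains a gid = false := by simpa using ha
        rw [if_pos (by rw [haf]; decide)]
        by_cases hc : c.contains gid = true
        · rw [if_pos hc]
          have hmem : gid ∈ pvEx0 c :=
            (pv_mem_ex0 c gid).mpr ⟨pvClassify a n gid,
              pv_mem_ex_of_contains c gid a n hinv hc, hcl⟩
          rw [pv_set_add_of_mem _ _ hmem]
          exact pv_loop a n gs c hinv
        · have hc' : c.contains gid = false := by simpa using hc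
          rw [if_neg hc]
          rw [pv_set_add_of_not_mem _ _ (pv_not_mem_ex0 c gid hc')]
          have hrec := pv_loop a n gs (c.insert gid (pvClassify a n gid)) (hinv' hc')
          have e0 : pvEx0 (c.insert gid (pvClassify a n gid)) = pvEx0 c ++ [gid] := by
            rw [pv_ex0_insert_fresh c gid _ hc', hcl]; simp
          have e1 : pvEx1 (c.insert gid (pvClassify a n gid)) = pvEx1 c := by
            rw [pv_ex1_insert_fresh c gid _ hc', hcl]; simp
          rw [e0, e1] at hrec
          exact hrec

-- ===== VERDICT (by name: the statement is the Claim_ definition above) =====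
theorem audit_ncaam_py_spec : Claim_equal_audit_ncaam_py := by
  intro games a n _
  unfold Spec_audit_ncaam_py audit_ncaam_py audit_ncaam_py_alt
  have hstep :
      (fun (c : PySem.Dict String Int) (g : List (String × String)) =>
        let gid := pvGid g
        if gid == "" then c
        else if c.contains gid then c
        else c.insert gid
          ((n.foldl (fun d i => if d.contains i then d.insert i 2 else d)
            (a.foldl (fun d i => d.insert i 1) PySem.Dict.empty)).getD gid 0))
      = (fun (c : PySem.Dict String Int) (g : List (String × String)) =>
        let gid := pvGid g
        if gid == "" then c
        else if c.contains gid then c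
        else c.insert gid (pvClassify a n gid)) := by
    funext c g; simp only [pv_status_getD]
  simp only [hstep]
  have h := pv_loop a n games PySem.Dict.empty
    (by rintro ⟨x, y⟩ hp; simp [PySem.Dict.empty] at hp)
  simpa [pvEx0, pvEx1] using h
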